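-- pv_equiv track=rewrite | github.com/shotleft/zondo-knowledge-graph | kg_builder/rex/rex_base.py | rebel_get_triples
-- ===== SOURCE A (Python) =====
-- def rebel_get_triples(text):
--     '''
--     Function to extract relations from the rebel model outputs as
--     supplied at https://huggingface.co/Babelscape/rebel-large
--     '''
--     relations = []
--     relation, subject, relation, object_ = '', '', '', ''
--     text = text.strip()
--     current = 'x'
--     text_replaced = text.replace("<s>", "").replace("<pad>", "").replace("</s>", "")
--     for token in text_replaced.split():
--         if token == "<triplet>":
--             current = 't'
--             if relation != '':
--                 relations.append({
--                     'head': subject.strip(),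
--                     'type': relation.strip(),
--                     'tail': object_.strip()
--                 })
--                 relation = ''
--             subject = ''
--         elif token == "<subj>":
--             current = 's'
--             if relation != '':
--                 relations.append({
--                     'head': subject.strip(),
--                     'type': relation.strip(),
--                     'tail': object_.strip()
--                 })
--             object_ = ''
--         elif token == "<obj>":
--             current = 'o'
--             relation = ''
--         else:
--             if current == 't':
--                 subject += ' ' + token
--             elif current == 's':
--                 object_ += ' ' + token
--             elif current == 'o':
--                 relation += ' ' + token
--     if subject != '' and relation != '' and object_ != '':
--         relations.append({
--             'head': subject.strip(),
--             'type': relation.strip(),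
--             'tail': object_.strip()
--         })
--     return relations
-- ===== SOURCE B (Python) =====
-- MARKERS = ("<triplet>", "<subj>", "<obj>")
--
--
-- def _segments(tokens):
--     '''Split the token list into (marker, words) segments; tokens before
--     the first marker are dropped.'''
--     segs = []
--     i, n = 0, len(tokens)
--     while i < n:
--         if tokens[i] in MARKERS:
--             j = i + 1
--             while j < n and tokens[j] not in MARKERS:
--                 j += 1
--             segs.append((tokens[i], tokens[i + 1:j]))
--             i = j
--         else:
--             i += 1
--     return segs
--
--
-- def rebel_get_triples(text):
--     '''
--     Extract relation triples from REBEL model output: group the token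
--     stream into marker-delimited segments, then fold over the segments.
--     '''
--     cleaned = (text.strip().replace("<s>", "")
--                            .replace("<pad>", "")
--                            .replace("</s>", ""))
--     triples = []
--     head, tail, rel = '', '', ''
--     for marker, words in _segments(cleaned.split()):
--         phrase = ' '.join(words)
--         if marker == "<triplet>":
--             if rel:
--                 triples.append({'head': head, 'type': rel, 'tail': tail})
--                 rel = ''
--             head = phrase
--         elif marker == "<subj>":
--             if rel:
--                 triples.append({'head': head, 'type': rel, 'tail': tail})
--             tail = phrase
--         else:
--             rel = phrase
--     if head and rel and tail:
--         triples.append({'head': head, 'type': rel, 'tail': tail})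
--     return triples
-- ===== Notes on version B (the rewrite author's own statement) =====
-- stated objective: alternative
-- what changed: Replaces A's token-by-token state machine (a 'current' mode flag plus incremental ' '+token string concatenation into three accumulators) by a two-phase decomposition: first group the token stream into (marker, words) segments, then fold once over the segments, assigning each field wholesale with ' '.join and emitting triples at segment boundaries.
import Mathlib
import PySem

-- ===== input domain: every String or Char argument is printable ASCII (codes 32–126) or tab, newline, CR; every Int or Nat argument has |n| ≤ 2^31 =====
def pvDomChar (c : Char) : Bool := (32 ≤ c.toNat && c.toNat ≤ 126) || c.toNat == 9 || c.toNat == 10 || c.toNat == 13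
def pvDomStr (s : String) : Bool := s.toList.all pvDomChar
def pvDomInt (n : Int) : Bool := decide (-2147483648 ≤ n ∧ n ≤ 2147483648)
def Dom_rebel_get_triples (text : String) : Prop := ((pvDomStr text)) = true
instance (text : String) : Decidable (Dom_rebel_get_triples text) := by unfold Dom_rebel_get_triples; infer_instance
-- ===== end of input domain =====

-- B re-decomposes A's token-by-token state machine as marker-delimited segment grouping
-- followed by a single fold over the segments (objective: alternative decomposition, same cost).

-- ===== PORT A =====
-- A's emitted dict {'head': …, 'type': …, 'tail': …} (fields stripped at emission).
def pvTripleA (subject relation object_ : List Char) : List (String × String) :=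
  [("head", String.ofList (PySem.Chars.strip subject)),
   ("type", String.ofList (PySem.Chars.strip relation)),
   ("tail", String.ofList (PySem.Chars.strip object_))]

-- one iteration of A's token loop; state = (relations, relation, subject, object_, current)
-- (in the "<triplet>" branch relation ends '' whether or not the emission fired, as in A)
def pvStepA (st : List (List (String × String)) × List Char × List Char × List Char × String)
    (token : List Char) :
    List (List (String × String)) × List Char × List Char × List Char × String :=
  match st with
  | (relations, relation, subject, object_, current) =>
    if token = "<triplet>".toList then
      ((if relation ≠ [] then relations ++ [pvTripleA subject relation object_] else relations),
       [], [], object_, "t")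
    else if token = "<subj>".toList then
      ((if relation ≠ [] then relations ++ [pvTripleA subject relation object_] else relations),
       relation, subject, [], "s")
    else if token = "<obj>".toList then
      (relations, [], subject, object_, "o")
    else if current = "t" then (relations, relation, subject ++ ' ' :: token, object_, current)
    else if current = "s" then (relations, relation, subject, object_ ++ ' ' :: token, current)
    else if current = "o" then (relations, relation ++ ' ' :: token, subject, object_, current)
    else (relations, relation, subject, object_, current)

def rebel_get_triples (text : String) : List (List (String × String)) :=
  let t := PySem.Chars.strip text.toList
  let text_replaced :=
    PySem.Chars.replace (PySem.Chars.replace (PySem.Chars.replace t "<s>".toList [])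
      "<pad>".toList []) "</s>".toList []
  match (PySem.Chars.split₀ text_replaced).foldl pvStepA ([], [], [], [], "x") with
  | (relations, relation, subject, object_, _) =>
    if subject ≠ [] ∧ relation ≠ [] ∧ object_ ≠ [] then
      relations ++ [pvTripleA subject relation object_]
    else relations

-- ===== PORT B =====
def pvIsMarker (t : List Char) : Bool :=
  t = "<triplet>".toList || t = "<subj>".toList || t = "<obj>".toList

-- Source B's _segments: group tokens into (marker, following words) segments,
-- dropping the tokens before the first marker.
def pvSegments : List (List Char) → List (List Char × List (List Char))
  | [] => []
  | t :: ts =>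
    if pvIsMarker t then
      (t, ts.takeWhile (fun w => !pvIsMarker w)) ::
        pvSegments (ts.dropWhile (fun w => !pvIsMarker w))
    else pvSegments ts
termination_by ts => ts.length
decreasing_by
  · exact Nat.lt_succ_of_le (List.length_dropWhile_le _ _)
  · exact Nat.lt_succ_self _

-- B's emitted dict (fields are already clean ' '.joins)
def pvTripleB (head rel tail : List Char) : List (String × String) :=
  [("head", String.ofList head), ("type", String.ofList rel), ("tail", String.ofList tail)]

-- one iteration of B's segment loop; state = (triples, head, tail, rel)
def pvStepB (st : List (List (String × String)) × List Char × List Char × List Char)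
    (seg : List Char × List (List Char)) :
    List (List (String × String)) × List Char × List Char × List Char :=
  match st with
  | (triples, head, tail, rel) =>
    let phrase := PySem.Chars.join [' '] seg.2
    if seg.1 = "<triplet>".toList then
      ((if rel ≠ [] then triples ++ [pvTripleB head rel tail] else triples), phrase, tail, [])
    else if seg.1 = "<subj>".toList then
      ((if rel ≠ [] then triples ++ [pvTripleB head rel tail] else triples), head, phrase, rel)
    else (triples, head, tail, phrase)

def rebel_get_triples_alt (text : String) : List (List (String × String)) :=
  let cleaned :=
    PySem.Chars.replace (PySem.Chars.replace (PySem.Chars.replace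
      (PySem.Chars.strip text.toList) "<s>".toList []) "<pad>".toList []) "</s>".toList []
  match (pvSegments (PySem.Chars.split₀ cleaned)).foldl pvStepB ([], [], [], []) with
  | (triples, head, tail, rel) =>
    if head ≠ [] ∧ rel ≠ [] ∧ tail ≠ [] then triples ++ [pvTripleB head rel tail]
    else triples

-- ===== PRECONDITION & SPEC =====
def Spec_rebel_get_triples (text : String) (out : List (List (String × String))) : Prop := out = rebel_get_triples_alt text
instance (text : String) (out : List (List (String × String))) : Decidable (Spec_rebel_get_triples text out) := by unfold Spec_rebel_get_triples; infer_instance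

-- ===== CLAIM (what is proved, stated in full; the proofs are below) =====
def Claim_equal_rebel_get_triples : Prop := ∀ (text : String), Dom_rebel_get_triples text → Spec_rebel_get_triples text (rebel_get_triples text)

-- ===== LEMMAS AND PROOFS =====

-- a token produced by split₀: nonempty, no whitespace characters
def pvWF (w : List Char) : Prop := w ≠ [] ∧ ∀ c ∈ w, PySem.Chars.isspace c = false

-- how A encodes a clean field value: empty, or carrying the leading space of ' ' + token
def pvEnc (x : List Char) : List Char := if x = [] then [] else ' ' :: x

-- A's accumulated run of words
def pvCat (ws : List (List Char)) : List Char := ws.flatMap (fun w => ' ' :: w)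

theorem pvEnc_nil : pvEnc [] = [] := rfl

theorem pvEnc_ne_nil (x : List Char) : (pvEnc x ≠ []) ↔ (x ≠ []) := by
  by_cases hx : x = [] <;> simp [pvEnc, hx]

theorem pvStrip_nil : PySem.Chars.strip [] = [] := rfl

theorem pvStrip_enc (x : List Char) (hx : PySem.Chars.strip x = x) :
    PySem.Chars.strip (pvEnc x) = x := by
  by_cases h : x = []
  · simp [pvEnc, h, pvStrip_nil]
  · have hsp : PySem.Chars.isspace ' ' = true := by decide
    calc PySem.Chars.strip (pvEnc x) = PySem.Chars.strip x := by
          simp [pvEnc, h, PySem.Chars.strip, PySem.Chars.lstrip, hsp]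
      _ = x := hx

theorem pvLstripFix (cs : List Char)
    (h : ∀ c, cs.head? = some c → PySem.Chars.isspace c = false) :
    PySem.Chars.lstrip cs = cs := by
  cases cs with
  | nil => rfl
  | cons c t => simp [PySem.Chars.lstrip, h c rfl]

theorem pvRstripFix (cs : List Char)
    (h : ∀ c, cs.getLast? = some c → PySem.Chars.isspace c = false) :
    PySem.Chars.rstrip cs = cs := by
  have : List.dropWhile PySem.Chars.isspace cs.reverse = cs.reverse := by
    cases hr : cs.reverse with
    | nil => rfl
    | cons c t =>
      have : cs.getLast? = some c := by
        rw [← List.head?_reverse]; simp [hr]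
      simp [h c this]
  simp [PySem.Chars.rstrip, this]

theorem pvJoin_main (ws : List (List Char)) (hws : ∀ w ∈ ws, pvWF w) (hne : ws ≠ []) :
    PySem.Chars.join [' '] ws ≠ [] ∧
    (∀ c, (PySem.Chars.join [' '] ws).head? = some c → PySem.Chars.isspace c = false) ∧
    (∀ c, (PySem.Chars.join [' '] ws).getLast? = some c → PySem.Chars.isspace c = false) ∧
    pvCat ws = ' ' :: PySem.Chars.join [' '] ws := by
  induction ws with
  | nil => exact absurd rfl hne
  | cons w ws ih =>
    obtain ⟨hw, hwc⟩ := hws w (by simp)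
    cases ws with
    | nil =>
      rw [PySem.Chars.join_singleton]
      refine ⟨hw, ?_, ?_, by simp [pvCat]⟩
      · intro c hc; exact hwc c (List.mem_of_mem_head? (by simp [hc]))
      · intro c hc; exact hwc c (List.mem_of_getLast? hc)
    | cons v l =>
      obtain ⟨h1, h2, h3, h4⟩ := ih (fun x hx => hws x (by simp [hx])) (by simp)
      rw [PySem.Chars.join_cons_cons]
      have hform : w ++ [' '] ++ PySem.Chars.join [' '] (v :: l)
          = w ++ (' ' :: PySem.Chars.join [' '] (v :: l)) := by simp
      refine ⟨by simp [hw], ?_, ?_, ?_⟩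
      · intro c hc
        rw [hform, List.head?_append_of_ne_nil _ hw] at hc
        exact hwc c (List.mem_of_mem_head? (by simp [hc]))
      · intro c hc
        rw [List.getLast?_append] at hc
        cases hj : (PySem.Chars.join [' '] (v :: l)).getLast? with
        | none => exact absurd hj (by simpa using List.getLast?_eq_none_iff.not.2 (by simpa using h1))
        | some d =>
          rw [List.getLast?_append, hj] at hc
          simp at hc
          exact h3 c (by rw [hj, ← hc])
      · show pvCat (w :: v :: l) = _
        simp only [pvCat, List.flatMap_cons] at h4 ⊢
        rw [h4, hform]
        simp

theorem pvStripFix_join (ws : List (List Char)) (hws : ∀ w ∈ ws, pvWF w) :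
    PySem.Chars.strip (PySem.Chars.join [' '] ws) = PySem.Chars.join [' '] ws := by
  by_cases hne : ws = []
  · subst hne
    simp [PySem.Chars.join, List.intercalate, pvStrip_nil]
  · obtain ⟨h1, h2, h3, _⟩ := pvJoin_main ws hws hne
    show PySem.Chars.rstrip (PySem.Chars.lstrip _) = _
    rw [pvLstripFix _ h2, pvRstripFix _ h3]

theorem pvCat_eq (ws : List (List Char)) (hws : ∀ w ∈ ws, pvWF w) :
    pvCat ws = pvEnc (PySem.Chars.join [' '] ws) := by
  by_cases hne : ws = []
  · subst hne; rfl
  · obtain ⟨h1, _, _, h4⟩ := pvJoin_main ws hws hne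
    rw [h4, pvEnc, if_neg h1]

theorem pvSplit_go_WF (s : List Char) : ∀ (cur : List Char) (acc : List (List Char)),
    (∀ c ∈ cur, PySem.Chars.isspace c = false) →
    (∀ w ∈ acc, pvWF w) →
    ∀ w ∈ PySem.Chars.split₀.go s cur acc, pvWF w := by
  induction s with
  | nil =>
    intro cur acc hcur hacc w hw
    by_cases hc : cur.isEmpty
    · rw [PySem.Chars.split₀.go, if_pos hc] at hw
      exact hacc w (by simpa using hw)
    · rw [PySem.Chars.split₀.go, if_neg hc] at hw
      simp at hw
      rcases hw with hw | hw
      · exact hacc w hw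
      · subst hw
        have hcne : cur ≠ [] := by simpa [List.isEmpty_iff] using hc
        exact ⟨by simpa using hcne, fun c hcm => hcur c (by simpa using hcm)⟩
  | cons c rest ih =>
    intro cur acc hcur hacc w hw
    by_cases hs : PySem.Chars.isspace c
    · by_cases hc : cur.isEmpty
      · rw [PySem.Chars.split₀.go, if_pos hs, if_pos hc] at hw
        exact ih [] acc (by simp) hacc w hw
      · rw [PySem.Chars.split₀.go, if_pos hs, if_neg hc] at hw
        refine ih [] (cur.reverse :: acc) (by simp) ?_ w hw
        intro v hv
        simp at hv
        rcases hv with hv | hv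
        · subst hv
          have hcne : cur ≠ [] := by simpa [List.isEmpty_iff] using hc
          exact ⟨by simpa using hcne, fun d hd => hcur d (by simpa using hd)⟩
        · exact hacc v hv
    · rw [PySem.Chars.split₀.go, if_neg hs] at hw
      refine ih (c :: cur) acc ?_ hacc w hw
      intro d hd
      rcases List.mem_cons.1 hd with h | h
      · simpa [h] using hs
      · exact hcur d h

theorem pvSplit₀_WF (s : List Char) : ∀ w ∈ PySem.Chars.split₀ s, pvWF w :=
  pvSplit_go_WF s [] [] (by simp) (by simp)

theorem pvStepA_word (st : List (List (String × String)) × List Char × List Char × List Char × String)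
    (w : List Char) (hw : pvIsMarker w = false) :
    pvStepA st w =
      (if st.2.2.2.2 = "t" then (st.1, st.2.1, st.2.2.1 ++ ' ' :: w, st.2.2.2.1, st.2.2.2.2)
       else if st.2.2.2.2 = "s" then (st.1, st.2.1, st.2.2.1, st.2.2.2.1 ++ ' ' :: w, st.2.2.2.2)
       else if st.2.2.2.2 = "o" then (st.1, st.2.1 ++ ' ' :: w, st.2.2.1, st.2.2.2.1, st.2.2.2.2)
       else st) := by
  obtain ⟨rels, rel, subj, obj, cur⟩ := st
  simp only [pvIsMarker, Bool.or_eq_false_iff, decide_eq_false_iff_not] at hw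
  obtain ⟨⟨h1, h2⟩, h3⟩ := hw
  simp only [pvStepA, if_neg h1, if_neg h2, if_neg h3]

theorem pvRunT (ws : List (List Char)) (hws : ∀ w ∈ ws, pvIsMarker w = false) :
    ∀ rels rel subj obj, ws.foldl pvStepA (rels, rel, subj, obj, "t")
      = (rels, rel, subj ++ pvCat ws, obj, "t") := by
  induction ws with
  | nil => intro rels rel subj obj; simp [pvCat]
  | cons w ws ih =>
    intro rels rel subj obj
    rw [List.foldl_cons, pvStepA_word _ w (hws w (by simp))]
    simp only [String.reduceEq, reduceIte]
    rw [ih (fun x hx => hws x (by simp [hx]))]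
    simp [pvCat]

theorem pvRunS (ws : List (List Char)) (hws : ∀ w ∈ ws, pvIsMarker w = false) :
    ∀ rels rel subj obj, ws.foldl pvStepA (rels, rel, subj, obj, "s")
      = (rels, rel, subj, obj ++ pvCat ws, "s") := by
  induction ws with
  | nil => intro rels rel subj obj; simp [pvCat]
  | cons w ws ih =>
    intro rels rel subj obj
    rw [List.foldl_cons, pvStepA_word _ w (hws w (by simp))]
    simp only [String.reduceEq, reduceIte]
    rw [ih (fun x hx => hws x (by simp [hx]))]
    simp [pvCat]

theorem pvRunO (ws : List (List Char)) (hws : ∀ w ∈ ws, pvIsMarker w = false) :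
    ∀ rels rel subj obj, ws.foldl pvStepA (rels, rel, subj, obj, "o")
      = (rels, rel ++ pvCat ws, subj, obj, "o") := by
  induction ws with
  | nil => intro rels rel subj obj; simp [pvCat]
  | cons w ws ih =>
    intro rels rel subj obj
    rw [List.foldl_cons, pvStepA_word _ w (hws w (by simp))]
    simp only [String.reduceEq, reduceIte]
    rw [ih (fun x hx => hws x (by simp [hx]))]
    simp [pvCat]

theorem pvRunX (ws : List (List Char)) (hws : ∀ w ∈ ws, pvIsMarker w = false) :
    ∀ rels rel subj obj, ws.foldl pvStepA (rels, rel, subj, obj, "x")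
      = (rels, rel, subj, obj, "x") := by
  induction ws with
  | nil => intro rels rel subj obj; simp
  | cons w ws ih =>
    intro rels rel subj obj
    rw [List.foldl_cons, pvStepA_word _ w (hws w (by simp))]
    simp only [String.reduceEq, reduceIte]
    exact ih (fun x hx => hws x (by simp [hx])) rels rel subj obj

theorem pvSegments_skip (ts : List (List Char)) :
    pvSegments ts = pvSegments (ts.dropWhile (fun w => !pvIsMarker w)) := by
  induction ts with
  | nil => rfl
  | cons t ts ih =>
    by_cases h : pvIsMarker t
    · rw [List.dropWhile_cons]
      simp [h]
    · rw [pvSegments, if_neg h, List.dropWhile_cons]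
      simp [h, ih]

theorem pvDropWhile_head (ts : List (List Char)) :
    ts.dropWhile (fun w => !pvIsMarker w) = [] ∨
      pvIsMarker ((ts.dropWhile (fun w => !pvIsMarker w)).headD []) = true := by
  induction ts with
  | nil => exact Or.inl rfl
  | cons t ts ih =>
    rw [List.dropWhile_cons]
    by_cases h : pvIsMarker t
    · simp [h]
    · simpa [h] using ih

theorem pvMain : ∀ (n : Nat) (ts : List (List Char)), ts.length ≤ n →
    (∀ w ∈ ts, pvWF w) →
    (ts = [] ∨ pvIsMarker (ts.headD []) = true) →
    ∀ (rels : List (List (String × String))) (h t r : List Char) (cur : String),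
    PySem.Chars.strip h = h → PySem.Chars.strip t = t → PySem.Chars.strip r = r →
    ∃ cur',
      ts.foldl pvStepA (rels, pvEnc r, pvEnc h, pvEnc t, cur)
        = (((pvSegments ts).foldl pvStepB (rels, h, t, r)).1,
           pvEnc ((pvSegments ts).foldl pvStepB (rels, h, t, r)).2.2.2,
           pvEnc ((pvSegments ts).foldl pvStepB (rels, h, t, r)).2.1,
           pvEnc ((pvSegments ts).foldl pvStepB (rels, h, t, r)).2.2.1,
           cur') ∧
      PySem.Chars.strip ((pvSegments ts).foldl pvStepB (rels, h, t, r)).2.1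
        = ((pvSegments ts).foldl pvStepB (rels, h, t, r)).2.1 ∧
      PySem.Chars.strip ((pvSegments ts).foldl pvStepB (rels, h, t, r)).2.2.1
        = ((pvSegments ts).foldl pvStepB (rels, h, t, r)).2.2.1 ∧
      PySem.Chars.strip ((pvSegments ts).foldl pvStepB (rels, h, t, r)).2.2.2
        = ((pvSegments ts).foldl pvStepB (rels, h, t, r)).2.2.2 := by
  intro n
  induction n with
  | zero =>
    intro ts hlen _ _ rels h t r cur hh ht hr
    have hts : ts = [] := by cases ts with
      | nil => rfl
      | cons a l => simp at hlen
    subst hts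
    simp only [pvSegments, List.foldl_nil]
    exact ⟨cur, rfl, hh, ht, hr⟩
  | succ n ih =>
    intro ts hlen hWF hhead rels h t r cur hh ht hr
    cases ts with
    | nil =>
      simp only [pvSegments, List.foldl_nil]
      exact ⟨cur, rfl, hh, ht, hr⟩
    | cons m rest =>
      have hm : pvIsMarker m = true := by
        rcases hhead with h' | h'
        · exact absurd h' (by simp)
        · simpa using h'
      have hsplit : List.takeWhile (fun w => !pvIsMarker w) rest
          ++ List.dropWhile (fun w => !pvIsMarker w) rest = rest :=
        List.takeWhile_append_dropWhile
      have hws_marker : ∀ w ∈ List.takeWhile (fun w => !pvIsMarker w) rest,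
          pvIsMarker w = false := fun w hw => by
        simpa using List.mem_takeWhile_imp hw
      have hws_WF : ∀ w ∈ List.takeWhile (fun w => !pvIsMarker w) rest, pvWF w :=
        fun w hw => hWF w (List.mem_cons_of_mem _ ((List.takeWhile_sublist _).subset hw))
      have hrest'_WF : ∀ w ∈ List.dropWhile (fun w => !pvIsMarker w) rest, pvWF w :=
        fun w hw => hWF w (List.mem_cons_of_mem _ ((List.dropWhile_sublist _).subset hw))
      have hrest'_len : (List.dropWhile (fun w => !pvIsMarker w) rest).length ≤ n := by
        have := List.length_dropWhile_le (fun w => !pvIsMarker w) rest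
        simp at hlen
        omega
      have hrest'_head := pvDropWhile_head rest
      have hseg : pvSegments (m :: rest)
          = (m, List.takeWhile (fun w => !pvIsMarker w) rest)
            :: pvSegments (List.dropWhile (fun w => !pvIsMarker w) rest) := by
        rw [pvSegments, if_pos hm]
      have hTripleEq : r ≠ [] → pvTripleA (pvEnc h) (pvEnc r) (pvEnc t) = pvTripleB h r t := by
        intro _
        simp [pvTripleA, pvTripleB, pvStrip_enc _ hh, pvStrip_enc _ hr, pvStrip_enc _ ht]
      have hm3 : m = "<triplet>".toList ∨ m = "<subj>".toList ∨ m = "<obj>".toList := by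
        simpa [pvIsMarker, or_assoc] using hm
      -- the B-side first step, in each case
      rcases hm3 with hm3 | hm3 | hm3 <;> subst hm3
      · -- <triplet>
        have hA : List.foldl pvStepA (rels, pvEnc r, pvEnc h, pvEnc t, cur) ("<triplet>".toList :: rest)
            = List.foldl pvStepA
                ((if r ≠ [] then rels ++ [pvTripleB h r t] else rels),
                 pvEnc [], pvEnc (PySem.Chars.join [' '] (List.takeWhile (fun w => !pvIsMarker w) rest)),
                 pvEnc t, "t")
                (List.dropWhile (fun w => !pvIsMarker w) rest) := by
          rw [List.foldl_cons, ← hsplit, List.foldl_append]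
          have hstep : pvStepA (rels, pvEnc r, pvEnc h, pvEnc t, cur) "<triplet>".toList
              = ((if r ≠ [] then rels ++ [pvTripleB h r t] else rels), [], [], pvEnc t, "t") := by
            by_cases hrnil : r = []
            · simp [pvStepA, hrnil, pvEnc_nil]
            · simp [pvStepA, (pvEnc_ne_nil r).2 hrnil, hrnil, hTripleEq hrnil]
          rw [hstep, pvRunT _ hws_marker, pvCat_eq _ hws_WF]
          simp [pvEnc_nil]
        have hB : (pvSegments ("<triplet>".toList :: rest)).foldl pvStepB (rels, h, t, r)
            = (pvSegments (List.dropWhile (fun w => !pvIsMarker w) rest)).foldl pvStepB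
                ((if r ≠ [] then rels ++ [pvTripleB h r t] else rels),
                 PySem.Chars.join [' '] (List.takeWhile (fun w => !pvIsMarker w) rest), t, []) := by
          rw [hseg, List.foldl_cons]
          simp [pvStepB]
        rw [hA, hB]
        exact ih _ hrest'_len hrest'_WF hrest'_head _ _ _ _ "t"
          (pvStripFix_join _ hws_WF) ht pvStrip_nil
      · -- <subj>
        have hA : List.foldl pvStepA (rels, pvEnc r, pvEnc h, pvEnc t, cur) ("<subj>".toList :: rest)
            = List.foldl pvStepA
                ((if r ≠ [] then rels ++ [pvTripleB h r t] else rels),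
                 pvEnc r, pvEnc h,
                 pvEnc (PySem.Chars.join [' '] (List.takeWhile (fun w => !pvIsMarker w) rest)), "s")
                (List.dropWhile (fun w => !pvIsMarker w) rest) := by
          rw [List.foldl_cons, ← hsplit, List.foldl_append]
          have hstep : pvStepA (rels, pvEnc r, pvEnc h, pvEnc t, cur) "<subj>".toList
              = ((if r ≠ [] then rels ++ [pvTripleB h r t] else rels), pvEnc r, pvEnc h, [], "s") := by
            by_cases hrnil : r = []
            · simp [pvStepA, hrnil, pvEnc_nil]
            · simp [pvStepA, (pvEnc_ne_nil r).2 hrnil, hrnil, hTripleEq hrnil]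
          rw [hstep, pvRunS _ hws_marker, pvCat_eq _ hws_WF]
          simp
        have hB : (pvSegments ("<subj>".toList :: rest)).foldl pvStepB (rels, h, t, r)
            = (pvSegments (List.dropWhile (fun w => !pvIsMarker w) rest)).foldl pvStepB
                ((if r ≠ [] then rels ++ [pvTripleB h r t] else rels), h,
                 PySem.Chars.join [' '] (List.takeWhile (fun w => !pvIsMarker w) rest), r) := by
          rw [hseg, List.foldl_cons]
          simp [pvStepB]
        rw [hA, hB]
        exact ih _ hrest'_len hrest'_WF hrest'_head _ _ _ _ "s"
          hh (pvStripFix_join _ hws_WF) hr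
      · -- <obj>
        have hA : List.foldl pvStepA (rels, pvEnc r, pvEnc h, pvEnc t, cur) ("<obj>".toList :: rest)
            = List.foldl pvStepA
                (rels, pvEnc (PySem.Chars.join [' '] (List.takeWhile (fun w => !pvIsMarker w) rest)),
                 pvEnc h, pvEnc t, "o")
                (List.dropWhile (fun w => !pvIsMarker w) rest) := by
          rw [List.foldl_cons, ← hsplit, List.foldl_append]
          have hstep : pvStepA (rels, pvEnc r, pvEnc h, pvEnc t, cur) "<obj>".toList
              = (rels, [], pvEnc h, pvEnc t, "o") := by
            simp [pvStepA]
          rw [hstep, pvRunO _ hws_marker, pvCat_eq _ hws_WF]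
          simp
        have hB : (pvSegments ("<obj>".toList :: rest)).foldl pvStepB (rels, h, t, r)
            = (pvSegments (List.dropWhile (fun w => !pvIsMarker w) rest)).foldl pvStepB
                (rels, h, t,
                 PySem.Chars.join [' '] (List.takeWhile (fun w => !pvIsMarker w) rest)) := by
          rw [hseg, List.foldl_cons]
          simp [pvStepB]
        rw [hA, hB]
        exact ih _ hrest'_len hrest'_WF hrest'_head _ _ _ _ "o"
          hh ht (pvStripFix_join _ hws_WF)

theorem pvBridge (toks : List (List Char)) (hWF : ∀ w ∈ toks, pvWF w) :
    (match toks.foldl pvStepA ([], [], [], [], "x") with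
     | (relations, relation, subject, object_, _) =>
       if subject ≠ [] ∧ relation ≠ [] ∧ object_ ≠ [] then
         relations ++ [pvTripleA subject relation object_]
       else relations)
    = (match (pvSegments toks).foldl pvStepB ([], [], [], []) with
       | (triples, head, tail, rel) =>
         if head ≠ [] ∧ rel ≠ [] ∧ tail ≠ [] then triples ++ [pvTripleB head rel tail]
         else triples) := by
  have hx : toks.foldl pvStepA ([], [], [], [], "x")
      = (toks.dropWhile (fun w => !pvIsMarker w)).foldl pvStepA ([], [], [], [], "x") := by
    conv_lhs => rw [← List.takeWhile_append_dropWhile (p := fun w => !pvIsMarker w) (l := toks)]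
    rw [List.foldl_append,
      pvRunX _ (fun w hw => by simpa using List.mem_takeWhile_imp hw)]
  obtain ⟨cur', hfold, f1, f2, f3⟩ := pvMain (toks.dropWhile (fun w => !pvIsMarker w)).length
    (toks.dropWhile (fun w => !pvIsMarker w)) le_rfl
    (fun w hw => hWF w ((List.dropWhile_sublist _).subset hw))
    (pvDropWhile_head toks) [] [] [] [] "x" pvStrip_nil pvStrip_nil pvStrip_nil
  simp only [pvEnc_nil] at hfold
  rw [pvSegments_skip toks, hx, hfold]
  rcases hR : (pvSegments (toks.dropWhile (fun w => !pvIsMarker w))).foldl pvStepB ([], [], [], [])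
    with ⟨rels', h', t', r'⟩
  rw [hR] at f1 f2 f3
  simp only
  by_cases hc : h' ≠ [] ∧ r' ≠ [] ∧ t' ≠ []
  · rw [if_pos (by simpa [pvEnc_ne_nil] using hc), if_pos hc]
    simp [pvTripleA, pvTripleB, pvStrip_enc _ f1, pvStrip_enc _ f2, pvStrip_enc _ f3]
  · rw [if_neg (by simpa [pvEnc_ne_nil] using hc), if_neg hc]

-- ===== VERDICT (by name: the statement is the Claim_ definition above) =====
theorem rebel_get_triples_spec : Claim_equal_rebel_get_triples := by
  intro text _
  show rebel_get_triples text = rebel_get_triples_alt text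
  unfold rebel_get_triples rebel_get_triples_alt
  exact pvBridge _ (pvSplit₀_WF _)
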